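-- pv_equiv track=rewrite | github.com/youyi-sizuru/Python-Learning | cv2/anime_face_catch.py | find_the_most_right_face
-- ===== SOURCE A (Python) =====
-- def find_the_most_right_face(face_list):
--     right_face = None
--     for (x, y, width, height) in face_list:
--         if right_face is None:
--             right_face = (x, y, width, height)
--         (_, _, right_width, right_height) = right_face
--         if right_width * right_height > width * height:
--             right_face = (x, y, width, height)
--     return right_face
-- ===== SOURCE B (Python) =====
-- def find_the_most_right_face(face_list):
--     if not face_list:
--         return None
--     m = min(w * h for (_, _, w, h) in face_list)
--     for (x, y, w, h) in face_list:
--         if w * h == m: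
--             return (x, y, w, h)
-- ===== Notes on version B (the rewrite author's own statement) =====
-- stated objective: idiomatic
-- what changed: Replaces the running-min scan with conditional tuple state by a two-pass min()-then-first-match early-return scan.
import Mathlib
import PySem

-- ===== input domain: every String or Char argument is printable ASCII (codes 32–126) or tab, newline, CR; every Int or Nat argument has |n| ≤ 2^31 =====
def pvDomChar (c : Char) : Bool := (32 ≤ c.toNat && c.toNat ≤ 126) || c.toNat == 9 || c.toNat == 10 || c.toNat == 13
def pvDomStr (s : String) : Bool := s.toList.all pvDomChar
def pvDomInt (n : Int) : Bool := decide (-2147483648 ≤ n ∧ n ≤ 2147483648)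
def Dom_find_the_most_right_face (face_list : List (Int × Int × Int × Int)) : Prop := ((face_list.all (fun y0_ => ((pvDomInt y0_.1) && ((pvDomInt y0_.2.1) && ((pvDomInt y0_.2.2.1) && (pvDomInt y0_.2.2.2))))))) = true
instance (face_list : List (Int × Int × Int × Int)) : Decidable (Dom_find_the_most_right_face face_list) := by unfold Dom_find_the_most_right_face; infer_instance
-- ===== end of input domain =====

-- B replaces A's running-min scan (conditional tuple state) by a two-pass
-- min()-then-first-match scan; same cost, plainer structure.

-- ===== PORT A =====
-- the loop body, named: first fill right_face if it is None, then destructure it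
-- and replace it when its area is strictly larger than the current face's
def pvStepA (right_face : Option (Int × Int × Int × Int)) (fc : Int × Int × Int × Int) :
    Option (Int × Int × Int × Int) :=
  let (x, y, width, height) := fc
  let right_face := match right_face with
    | none => some (x, y, width, height)
    | some r => some r
  match right_face with
  | none => none
  | some (rx, ry, right_width, right_height) =>
      if right_width * right_height > width * height then some (x, y, width, height)
      else some (rx, ry, right_width, right_height)

def find_the_most_right_face (face_list : List (Int × Int × Int × Int)) : Option (Int × Int × Int × Int) :=
  face_list.foldl pvStepA none

-- ===== PORT B =====
-- literal transliteration of Source B: empty guard, min of the areas, first-match scan.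
def find_the_most_right_face_alt (face_list : List (Int × Int × Int × Int)) : Option (Int × Int × Int × Int) :=
  match face_list with
  | [] => none
  | _ :: _ =>
    match PySem.List.min? (face_list.map (fun fc => fc.2.2.1 * fc.2.2.2)) (fun a => a) with
    | none => none  -- unreachable: face_list nonempty
    | some m => face_list.find? (fun fc => fc.2.2.1 * fc.2.2.2 == m)

-- ===== PRECONDITION & SPEC =====
def Spec_find_the_most_right_face (face_list : List (Int × Int × Int × Int)) (out : Option (Int × Int × Int × Int)) : Prop := out = find_the_most_right_face_alt face_list
instance (face_list : List (Int × Int × Int × Int)) (out : Option (Int × Int × Int × Int)) : Decidable (Spec_find_the_most_right_face face_list out) := by unfold Spec_find_the_most_right_face; infer_instance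

-- ===== CLAIM (what is proved, stated in full; the proofs are below) =====
def Claim_equal_find_the_most_right_face : Prop := ∀ (face_list : List (Int × Int × Int × Int)), Dom_find_the_most_right_face face_list → Spec_find_the_most_right_face face_list (find_the_most_right_face face_list)

-- ===== LEMMAS AND PROOFS =====

-- area of a face
def pvArea (fc : Int × Int × Int × Int) : Int := fc.2.2.1 * fc.2.2.2

-- A's loop step once the accumulator is filled
def pvG (r fc : Int × Int × Int × Int) : Int × Int × Int × Int :=
  if pvArea r > pvArea fc then fc else r

theorem pvStepA_none (f : Int × Int × Int × Int) : pvStepA none f = some f := by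
  obtain ⟨x, y, w, z⟩ := f
  simp [pvStepA]

theorem pvStepA_some (r f : Int × Int × Int × Int) : pvStepA (some r) f = some (pvG r f) := by
  obtain ⟨x, y, w, z⟩ := f
  obtain ⟨rx, ry, rw, rz⟩ := r
  by_cases h : rw * rz > w * z <;> simp [pvStepA, pvG, pvArea, h]

theorem pvFoldl_some (t : List (Int × Int × Int × Int)) (r : Int × Int × Int × Int) :
    t.foldl pvStepA (some r) = some (t.foldl pvG r) := by
  induction t generalizing r with
  | nil => rfl
  | cons s t ih => simp only [List.foldl_cons, pvStepA_some]; exact ih (pvG r s)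

theorem pvA_eq (l : List (Int × Int × Int × Int)) :
    find_the_most_right_face l = match l with
      | [] => none
      | f :: t => some (t.foldl pvG f) := by
  cases l with
  | nil => rfl
  | cons f t =>
    simp only [find_the_most_right_face, List.foldl_cons, pvStepA_none]
    exact pvFoldl_some t f

theorem pvFoldl_min_le (xs : List Int) (a : Int) : xs.foldl min a ≤ a := by
  induction xs generalizing a with
  | nil => simp
  | cons x xs ih => exact le_trans (ih (min a x)) (min_le_left a x)

-- the heart: A's running-min result is the first element of minimal area
theorem pvMain (t : List (Int × Int × Int × Int)) (f : Int × Int × Int × Int) :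
    (f :: t).find? (fun fc => fc.2.2.1 * fc.2.2.2 == (t.map (fun fc => fc.2.2.1 * fc.2.2.2)).foldl min (f.2.2.1 * f.2.2.2))
    = some (t.foldl pvG f) := by
  induction t generalizing f with
  | nil => simp
  | cons s t ih =>
    simp only [List.map_cons, List.foldl_cons]
    by_cases h : f.2.2.1 * f.2.2.2 > s.2.2.1 * s.2.2.2
    · -- s strictly smaller: the accumulator becomes s, and f cannot hit the minimum
      have hmin : min (f.2.2.1 * f.2.2.2) (s.2.2.1 * s.2.2.2) = s.2.2.1 * s.2.2.2 :=
        min_eq_right (le_of_lt h)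
      rw [hmin]
      have hle : (t.map (fun fc => fc.2.2.1 * fc.2.2.2)).foldl min (s.2.2.1 * s.2.2.2)
          ≤ s.2.2.1 * s.2.2.2 := pvFoldl_min_le _ _
      have hg : pvG f s = s := by simp [pvG, pvArea, h]
      rw [List.find?_cons_of_neg (by simp; omega), hg]
      exact ih s
    · -- f stays; if f misses the minimum so does s
      have hfs : f.2.2.1 * f.2.2.2 ≤ s.2.2.1 * s.2.2.2 := not_lt.mp h
      have hmin : min (f.2.2.1 * f.2.2.2) (s.2.2.1 * s.2.2.2) = f.2.2.1 * f.2.2.2 :=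
        min_eq_left hfs
      rw [hmin]
      have hle : (t.map (fun fc => fc.2.2.1 * fc.2.2.2)).foldl min (f.2.2.1 * f.2.2.2)
          ≤ f.2.2.1 * f.2.2.2 := pvFoldl_min_le _ _
      have hg : pvG f s = f := by simp [pvG, pvArea, h]
      rw [hg]
      have ihf := ih f
      by_cases hf : f.2.2.1 * f.2.2.2 = (t.map (fun fc => fc.2.2.1 * fc.2.2.2)).foldl min (f.2.2.1 * f.2.2.2)
      · rw [List.find?_cons_of_pos (by simp only [beq_iff_eq]; exact hf)]
        rw [List.find?_cons_of_pos (by simp only [beq_iff_eq]; exact hf)] at ihf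
        exact ihf
      · have hs : ¬ (s.2.2.1 * s.2.2.2 = (t.map (fun fc => fc.2.2.1 * fc.2.2.2)).foldl min (f.2.2.1 * f.2.2.2)) := by omega
        rw [List.find?_cons_of_neg (by simp only [beq_iff_eq]; exact hf), List.find?_cons_of_neg (by simp only [beq_iff_eq]; exact hs)]
        rw [List.find?_cons_of_neg (by simp only [beq_iff_eq]; exact hf)] at ihf
        exact ihf

-- ===== VERDICT (by name: the statement is the Claim_ definition above) =====
theorem find_the_most_right_face_spec : Claim_equal_find_the_most_right_face := by
  intro l _
  unfold Spec_find_the_most_right_face find_the_most_right_face_alt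
  cases l with
  | nil => rfl
  | cons f t =>
    rw [pvA_eq]
    simp only [List.map_cons, PySem.List.min?_id_cons]
    exact (pvMain t f).symm
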